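-- pv_equiv track=rewrite | github.com/DTaSchweppes/tasks-from-interviews | rtk-tasks.py | is_unique_counts
-- ===== SOURCE A (Python) =====
-- def is_unique_counts(nums):
--     counts = {}
--
--     # Подсчет количества вхождений каждого числа
--     for num in nums:
--         if num in counts:
--             counts[num] += 1
--         else:
--             counts[num] = 1
--
--     # Проверка на уникальность количества вхождений
--     occurrences = set(counts.values())
--     return len(occurrences) == len(counts)
-- ===== SOURCE B (Python) =====
-- def is_unique_counts(nums):
--     counts = {}
--     for num in nums:
--         counts[num] = counts.get(num, 0) + 1
--     vals = sorted(counts.values())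
--     return all(a != b for a, b in zip(vals, vals[1:]))
-- ===== Notes on version B (the rewrite author's own statement) =====
-- stated objective: alternative
-- what changed: The set-cardinality uniqueness test (len(set(values)) == len(counts)) is replaced by sorting the count values and scanning once for an equal adjacent pair.
import Mathlib
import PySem

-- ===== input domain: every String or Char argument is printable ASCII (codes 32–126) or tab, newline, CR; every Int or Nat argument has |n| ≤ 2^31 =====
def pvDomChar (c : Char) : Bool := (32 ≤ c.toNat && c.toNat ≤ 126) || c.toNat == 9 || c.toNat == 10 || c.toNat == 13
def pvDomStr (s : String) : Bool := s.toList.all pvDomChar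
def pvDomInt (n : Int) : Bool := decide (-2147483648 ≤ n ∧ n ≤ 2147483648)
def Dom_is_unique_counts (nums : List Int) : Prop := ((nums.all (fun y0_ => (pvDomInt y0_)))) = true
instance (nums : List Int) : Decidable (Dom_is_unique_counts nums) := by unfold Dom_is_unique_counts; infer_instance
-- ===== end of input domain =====

-- B replaces A's set-cardinality uniqueness test with a sort-then-adjacent-duplicate scan (alternative decomposition, similar cost).

-- ===== PORT A =====
def is_unique_counts (nums : List Int) : Bool :=
  let counts := nums.foldl
    (fun d num => if d.contains num then d.insert num (d.getD num 0 + 1) else d.insert num 1)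
    (PySem.Dict.empty : PySem.Dict Int Int)
  let occurrences : PySem.Set Int := PySem.Set.ofList counts.values
  decide (PySem.Set.len occurrences = (PySem.Dict.size counts : Int))

-- ===== PORT B =====
def is_unique_counts_alt (nums : List Int) : Bool :=
  let counts := nums.foldl (fun d num => d.insert num (d.getD num 0 + 1)) (PySem.Dict.empty : PySem.Dict Int Int)
  let vals := PySem.List.sorted counts.values (fun x => x) false
  (vals.zip (vals.drop 1)).all (fun p => p.1 != p.2)

-- ===== PRECONDITION & SPEC =====
def Spec_is_unique_counts (nums : List Int) (out : Bool) : Prop := out = is_unique_counts_alt nums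
instance (nums : List Int) (out : Bool) : Decidable (Spec_is_unique_counts nums out) := by unfold Spec_is_unique_counts; infer_instance

-- ===== CLAIM (what is proved, stated in full; the proofs are below) =====
def Claim_equal_is_unique_counts : Prop := ∀ (nums : List Int), Dom_is_unique_counts nums → Spec_is_unique_counts nums (is_unique_counts nums)

-- ===== LEMMAS AND PROOFS =====

-- A's counting step equals the standard counter step (when the key is absent, getD yields 0).
theorem pv_stepA_eq (d : PySem.Dict Int Int) (x : Int) :
    (if d.contains x then d.insert x (d.getD x 0 + 1) else d.insert x 1)
      = d.insert x (d.getD x 0 + 1) := by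
  by_cases h : d.contains x = true
  · simp [h]
  · simp [h, PySem.Dict.getD_of_not_contains d 0 (by simpa using h)]

-- set(xs) (first occurrences) is a sublist of xs.
theorem pv_ofList_sublist {α : Type} [BEq α] (xs : List α) :
    (PySem.Set.ofList xs).Sublist xs := by
  induction xs using List.reverseRecOn with
  | nil => simp [PySem.Set.ofList_nil]
  | append_singleton xs x ih =>
      rw [PySem.Set.ofList_append_singleton, PySem.Set.add]
      split
      · exact ih.trans (List.sublist_append_left xs [x])
      · exact ih.append (List.Sublist.refl [x])

-- len(set(vs)) = len(vs) iff vs has no duplicates.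
theorem pv_len_ofList_iff (vs : List Int) :
    (PySem.Set.ofList vs).length = vs.length ↔ vs.Nodup := by
  constructor
  · intro h
    have := (pv_ofList_sublist vs).eq_of_length h
    rw [← this]; exact PySem.Set.nodup_ofList vs
  · intro h; rw [PySem.Set.ofList_eq_self_of_nodup vs h]

-- On a weakly increasing list, no equal adjacent pair iff no duplicates at all.
theorem pv_adj_ne_iff_nodup : ∀ (ws : List Int), ws.Pairwise (· ≤ ·) →
    (((ws.zip (ws.drop 1)).all (fun p => p.1 != p.2)) = true ↔ ws.Nodup) := by
  intro ws
  induction ws with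
  | nil => simp
  | cons a t ih =>
      intro hp
      cases t with
      | nil => simp
      | cons b u =>
          have hpt : (b :: u).Pairwise (· ≤ ·) := hp.tail
          have hab : a ≤ b := (List.pairwise_cons.1 hp).1 b (by simp)
          have ihe := ih hpt
          constructor
          · intro h
            simp only [List.drop, List.zip_cons_cons, List.all_cons, Bool.and_eq_true] at h
            obtain ⟨hne, hrest⟩ := h
            have hne' : a ≠ b := by simpa using hne
            have hnd : (b :: u).Nodup := ihe.1 (by simpa using hrest)
            refine List.nodup_cons.2 ⟨?_, hnd⟩
            intro hmem
            rcases List.mem_cons.1 hmem with rfl | hu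
            · exact hne' rfl
            · have hba : b ≤ a := (List.pairwise_cons.1 hpt).1 a hu
              exact hne' (le_antisymm hab hba)
          · intro h
            have hnm := (List.nodup_cons.1 h).1
            have hnd := (List.nodup_cons.1 h).2
            have hrest := ihe.2 hnd
            simp only [List.drop, List.zip_cons_cons, List.all_cons, Bool.and_eq_true]
            refine ⟨by simpa using fun hab' => hnm (by simp [hab']), by simpa using hrest⟩

-- ===== VERDICT (by name: the statement is the Claim_ definition above) =====
theorem is_unique_counts_spec : Claim_equal_is_unique_counts := by
  intro nums _
  unfold Spec_is_unique_counts
  have hA : is_unique_counts nums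
      = decide (PySem.Set.len (PySem.Set.ofList (PySem.Dict.counter nums).values)
          = ((PySem.Dict.counter nums).size : Int)) := by
    show decide (PySem.Set.len (PySem.Set.ofList (List.foldl
        (fun (d : PySem.Dict Int Int) num =>
          if d.contains num then d.insert num (d.getD num 0 + 1) else d.insert num 1)
        PySem.Dict.empty nums).values)
        = ((List.foldl (fun (d : PySem.Dict Int Int) num =>
            if d.contains num then d.insert num (d.getD num 0 + 1) else d.insert num 1)
          PySem.Dict.empty nums).size : Int)) = _
    rw [funext fun d => funext fun x => pv_stepA_eq d x,
        PySem.Dict.foldl_insert_getD_add_one_eq_counter]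
  have hB : is_unique_counts_alt nums
      = ((PySem.List.sorted (PySem.Dict.counter nums).values (fun x => x) false).zip
          ((PySem.List.sorted (PySem.Dict.counter nums).values (fun x => x) false).drop 1)).all
          (fun p => p.1 != p.2) := by
    show ((PySem.List.sorted (List.foldl (fun (d : PySem.Dict Int Int) num =>
              d.insert num (d.getD num 0 + 1)) PySem.Dict.empty nums).values (fun x => x) false).zip
          ((PySem.List.sorted (List.foldl (fun (d : PySem.Dict Int Int) num =>
              d.insert num (d.getD num 0 + 1)) PySem.Dict.empty nums).values (fun x => x) false).drop 1)).all
          (fun p => p.1 != p.2) = _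
    rw [PySem.Dict.foldl_insert_getD_add_one_eq_counter]
  rw [hA, hB]
  set vs := (PySem.Dict.counter nums).values with hvs
  rw [Bool.eq_iff_iff, decide_eq_true_iff]
  have hsz : ((PySem.Dict.counter nums).size : Int) = (vs.length : Int) := by
    simp [PySem.Dict.size, PySem.Dict.values, hvs]
  have hlen : (PySem.Set.len (PySem.Set.ofList vs) = ((PySem.Dict.counter nums).size : Int))
      ↔ vs.Nodup := by
    rw [hsz]
    constructor
    · intro h
      exact (pv_len_ofList_iff vs).1 (by
        have : ((PySem.Set.ofList vs).length : Int) = (vs.length : Int) := by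
          simpa [PySem.Set.len] using h
        exact_mod_cast this)
    · intro h
      simp [PySem.Set.len, (pv_len_ofList_iff vs).2 h]
  rw [hlen]
  have hpair : (PySem.List.sorted vs (fun x => x) false).Pairwise (· ≤ ·) := by
    simpa using PySem.List.sorted_pairwise vs (fun x => x)
  rw [pv_adj_ne_iff_nodup _ hpair]
  exact ((PySem.List.sorted_perm vs (fun x => x) false).nodup_iff).symm
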